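-- pv_equiv track=rewrite | github.com/sathish16787/dsa-practice | additional_problems/3_little_ponny_maximum_element.py | littlePony
-- ===== SOURCE A (Python) =====
-- def littlePony(A,B):
--   count = 0
--   result = 0
--   for i in range(len(A)):
--     if A[i] > B:
--       count += 1
--     if A[i] == B:
--       result += 1
--
--   if result > 0:
--     return count
--   else:
--     return -1
-- ===== SOURCE B (Python) =====
-- def littlePony(A, B):
--     S = sorted(A)
--     lo, hi = 0, len(S)
--     while lo < hi:
--         mid = (lo + hi) // 2
--         if S[mid] <= B:
--             lo = mid + 1
--         else:
--             hi = mid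
--     # lo = index of the first element greater than B in the sorted list
--     if lo > 0 and S[lo - 1] == B:
--         return len(S) - lo
--     return -1
-- ===== Notes on version B (the rewrite author's own statement) =====
-- stated objective: alternative
-- what changed: Replaces the fused linear two-counter loop with sort-then-binary-search: after sorting, one binary search finds the first index greater than B, which yields both the count of greater elements (len minus index) and the presence test (the predecessor equals B).
import Mathlib
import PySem

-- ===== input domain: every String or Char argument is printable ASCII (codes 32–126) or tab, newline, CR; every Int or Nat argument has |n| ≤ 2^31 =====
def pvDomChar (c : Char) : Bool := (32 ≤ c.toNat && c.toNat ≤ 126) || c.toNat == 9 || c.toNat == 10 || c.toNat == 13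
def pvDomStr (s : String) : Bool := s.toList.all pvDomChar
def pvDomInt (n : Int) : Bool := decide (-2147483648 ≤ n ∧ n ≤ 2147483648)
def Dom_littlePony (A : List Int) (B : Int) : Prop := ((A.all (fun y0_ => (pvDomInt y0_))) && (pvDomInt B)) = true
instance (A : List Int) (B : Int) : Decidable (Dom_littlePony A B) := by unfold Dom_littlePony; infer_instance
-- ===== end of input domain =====

-- B replaces the fused linear two-counter loop with sort + one binary search: the first index past
-- the elements ≤ B yields both the greater-count and the presence test (alternative decomposition).
-- ===== PORT A =====
def littlePony (A : List Int) (B : Int) : Int :=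
  let st := (PySem.List.pyRange 0 (A.length) 1).foldl (fun (s : Int × Int) i =>
    let count := if PySem.List.pyGetD A i 0 > B then s.1 + 1 else s.1
    let result := if PySem.List.pyGetD A i 0 = B then s.2 + 1 else s.2
    (count, result)) (0, 0)
  if st.2 > 0 then st.1 else -1

-- ===== PORT B =====
-- the while-loop of Source B; S[mid] is S.getD mid 0, exact since the loop keeps 0 ≤ mid < hi ≤ len S
def ponyBisect (S : List Int) (B : Int) (lo hi : Nat) : Nat :=
  if lo < hi then
    let mid := (lo + hi) / 2
    if S.getD mid 0 ≤ B then ponyBisect S B (mid + 1) hi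
    else ponyBisect S B lo mid
  else lo
termination_by hi - lo
decreasing_by all_goals omega

def littlePony_alt (A : List Int) (B : Int) : Int :=
  let S := PySem.List.sorted A (fun x => x) false
  let lo := ponyBisect S B 0 S.length
  if 0 < lo ∧ S.getD (lo - 1) 0 = B then (S.length : Int) - (lo : Int)
  else -1

-- ===== PRECONDITION & SPEC =====
def Spec_littlePony (A : List Int) (B : Int) (out : Int) : Prop := out = littlePony_alt A B
instance (A : List Int) (B : Int) (out : Int) : Decidable (Spec_littlePony A B out) := by unfold Spec_littlePony; infer_instance

-- ===== CLAIM =====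
def Claim_equal_littlePony : Prop := ∀ (A : List Int) (B : Int), Dom_littlePony A B → Spec_littlePony A B (littlePony A B)

-- ===== LEMMAS AND PROOFS =====

-- A's fused loop computes the two counters in one pass.
lemma littlePony_fold (A : List Int) (B : Int) (c r : Int) :
    A.foldl (fun (s : Int × Int) x =>
      ((if x > B then s.1 + 1 else s.1), (if x = B then s.2 + 1 else s.2))) (c, r)
    = (c + (A.countP (fun x => x > B) : Int), r + (A.countP (fun x => x = B) : Int)) := by
  induction A generalizing c r with
  | nil => simp
  | cons a t ih =>
    simp only [List.foldl_cons, ih, List.countP_cons]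
    split_ifs <;> simp_all <;> omega

-- The binary search returns a split point of the monotone list: everything before it is ≤ B,
-- everything from it on is > B.
lemma ponyBisect_spec (S : List Int) (B : Int)
    (hmono : ∀ p q : Nat, p ≤ q → q < S.length → S.getD p 0 ≤ S.getD q 0) :
    ∀ (lo hi : Nat), lo ≤ hi → hi ≤ S.length →
    (∀ i : Nat, i < lo → S.getD i 0 ≤ B) →
    (∀ i : Nat, hi ≤ i → i < S.length → B < S.getD i 0) →
    lo ≤ ponyBisect S B lo hi ∧ ponyBisect S B lo hi ≤ hi ∧
    (∀ i : Nat, i < ponyBisect S B lo hi → S.getD i 0 ≤ B) ∧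
    (∀ i : Nat, ponyBisect S B lo hi ≤ i → i < S.length → B < S.getD i 0) := by
  intro lo hi
  induction hn : hi - lo using Nat.strong_induction_on generalizing lo hi with
  | _ n ih =>
    intro hlh hhi hlow hhigh
    rw [ponyBisect]
    by_cases hlt : lo < hi
    · simp only [if_pos hlt]
      set mid := (lo + hi) / 2 with hmid
      have hm1 : lo ≤ mid := by omega
      have hm2 : mid < hi := by omega
      by_cases hle : S.getD mid 0 ≤ B
      · simp only [if_pos hle]
        have := ih (hi - (mid + 1)) (by omega) (mid + 1) hi rfl (by omega) hhi
          (fun i hi' => le_trans (hmono i mid (by omega) (by omega)) hle) hhigh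
        exact ⟨by omega, this.2.1, this.2.2.1, this.2.2.2⟩
      · simp only [if_neg hle]
        have := ih (mid - lo) (by omega) lo mid rfl (by omega) (by omega) hlow
          (fun i h1 h2 => lt_of_lt_of_le (lt_of_not_ge hle) (hmono mid i h1 h2))
        exact ⟨this.1, by omega, this.2.2.1, this.2.2.2⟩
    · simp only [if_neg hlt]
      exact ⟨le_refl _, by omega, hlow, fun i h1 h2 => hhigh i (by omega) h2⟩

-- A split point pins down both counts and membership on the sorted list.
lemma countP_le_of_split (S : List Int) (B : Int) (r : Nat) (hr : r ≤ S.length)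
    (h1 : ∀ i : Nat, i < r → S.getD i 0 ≤ B)
    (h2 : ∀ i : Nat, r ≤ i → i < S.length → B < S.getD i 0) :
    S.countP (fun x => decide (x ≤ B)) = r := by
  have hsplit : S = S.take r ++ S.drop r := (List.take_append_drop r S).symm
  rw [hsplit, List.countP_append]
  have htake : (S.take r).countP (fun x => decide (x ≤ B)) = (S.take r).length := by
    apply List.countP_eq_length.mpr
    intro x hx
    rcases List.mem_iff_getElem.mp hx with ⟨i, hi, he⟩
    have hil : i < S.length := lt_of_lt_of_le (lt_of_lt_of_le hi (by simp)) (le_refl _)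
    have : S[i]'(by simp at hi; omega) = x := by
      rw [← he]; simp [List.getElem_take]
    have := h1 i (by simp at hi; omega)
    rw [List.getD_eq_getElem] at this
    · simp only [decide_eq_true_eq]
      rw [← ‹S[i]'_ = x›]; exact this
  have hdrop : (S.drop r).countP (fun x => decide (x ≤ B)) = 0 := by
    apply List.countP_eq_zero.mpr
    intro x hx
    rcases List.mem_iff_getElem.mp hx with ⟨i, hi, he⟩
    have hil : r + i < S.length := by simp at hi; omega
    have hx' : S[r + i]'hil = x := by rw [← he]; simp [List.getElem_drop]
    have := h2 (r + i) (by omega) hil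
    rw [List.getD_eq_getElem] at this
    simp only [decide_eq_true_eq, not_le]
    rw [← hx']; exact this
  rw [htake, hdrop, List.length_take]
  omega

theorem littlePony_spec : Claim_equal_littlePony := by
  intro A B _
  unfold Spec_littlePony littlePony littlePony_alt
  rw [PySem.List.foldl_pyRange_zero_pyGetD' (f := fun (s : Int × Int) x =>
      ((if x > B then s.1 + 1 else s.1), (if x = B then s.2 + 1 else s.2))) (d := 0) (init := ((0:Int),(0:Int)))]
  rw [littlePony_fold]
  set S := PySem.List.sorted A (fun x => x) false with hS
  have hperm : S.Perm A := PySem.List.sorted_perm A (fun x => x) false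
  have hlen : S.length = A.length := hperm.length_eq
  have hmono : ∀ p q : Nat, p ≤ q → q < S.length → S.getD p 0 ≤ S.getD q 0 := by
    intro p q hpq hq
    rw [List.getD_eq_getElem _ _ (by omega), List.getD_eq_getElem _ _ hq]
    exact PySem.List.sorted_id_getElem_mono A hpq hq
  set r := ponyBisect S B 0 S.length with hr
  obtain ⟨-, hrle, hbelow, habove⟩ :=
    ponyBisect_spec S B hmono 0 S.length (by omega) (le_refl _) (by omega) (fun i h1 h2 => absurd h1 (by omega))
  have hcount : S.countP (fun x => decide (x ≤ B)) = r := countP_le_of_split S B r hrle hbelow habove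
  -- count of elements > B
  have hgt : (A.countP (fun x => x > B) : Int) = (S.length : Int) - (r : Int) := by
    have h1 : S.countP (fun x => decide (x ≤ B)) + S.countP (fun x => x > B) = S.length := by
      have := List.length_eq_countP_add_countP (l := S) (p := fun x => decide (x ≤ B))
      rw [this]
      congr 1
      apply List.countP_congr
      intro x _
      simp [not_le, gt_iff_lt]
    have h2 : S.countP (fun x => x > B) = A.countP (fun x => x > B) := hperm.countP_eq _
    omega
  -- membership: B present iff 0 < r and S[r-1] = B
  have hmem : (0 < r ∧ S.getD (r - 1) 0 = B) ↔ 0 < A.countP (fun x => x = B) := by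
    constructor
    · rintro ⟨hpos, heq⟩
      have hrl : r - 1 < S.length := by omega
      have : B ∈ S := by
        rw [← heq, List.getD_eq_getElem _ _ hrl]
        exact List.getElem_mem hrl
      have : B ∈ A := hperm.mem_iff.mp this
      apply List.countP_pos_iff.mpr
      exact ⟨B, this, by simp⟩
    · intro hpos
      obtain ⟨x, hxA, hx⟩ := List.countP_pos_iff.mp hpos
      have hxB : x = B := by simpa using hx
      subst hxB
      have hxS : x ∈ S := hperm.mem_iff.mpr hxA
      obtain ⟨i, hi, he⟩ := List.mem_iff_getElem.mp hxS
      have hile : S.getD i 0 ≤ x := by rw [List.getD_eq_getElem _ _ hi, he]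
      have hir : i < r := by
        by_contra h
        exact absurd hile (not_le.mpr (habove i (by omega) hi))
      refine ⟨by omega, le_antisymm (hbelow (r - 1) (by omega)) ?_⟩
      calc x = S.getD i 0 := by rw [List.getD_eq_getElem _ _ hi, he]
        _ ≤ S.getD (r - 1) 0 := hmono i (r - 1) (by omega) (by omega)
  by_cases hp : 0 < r ∧ S.getD (r - 1) 0 = B
  · have := hmem.mp hp
    rw [if_pos (by simpa using this), if_pos hp]
    simpa using hgt
  · have : ¬ 0 < A.countP (fun x => x = B) := fun h => hp (hmem.mpr h)
    rw [if_neg (by simpa using this), if_neg hp]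

-- ===== VERDICT =====
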